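-- pv_equiv track=rewrite | github.com/thetwelvedev/aprendendo-python | Beecrowd/1027.py | max_wave
-- ===== SOURCE A (Python) =====
-- def max_wave(points_low, points_high):
--     # Ordena por x
--     low = sorted(points_low)
--     high = sorted(points_high)
--
--     def simulate(start_low: bool):
--         i = j = 0
--         count = 0
--         last_x = -10**9
--         want_low = start_low
--
--         while True:
--             if want_low:
--                 # procura o menor x > last_x em low
--                 while i < len(low) and low[i] <= last_x:
--                     i += 1
--                 if i == len(low):
--                     break
--                 last_x = low[i]
--                 i += 1
--             else:
--                 # procura o menor x > last_x em high
--                 while j < len(high) and high[j] <= last_x: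
--                     j += 1
--                 if j == len(high):
--                     break
--                 last_x = high[j]
--                 j += 1
--
--             count += 1
--             want_low = not want_low
--
--         return count
--
--     return max(simulate(True), simulate(False))
-- ===== SOURCE B (Python) =====
-- def max_wave(points_low, points_high):
--     # One merged x-sorted list of tagged points; each answer is a single
--     # forward scan over it with a wanted-type flag.
--     merged = sorted([(x, True) for x in points_low] + [(x, False) for x in points_high],
--                     key=lambda p: p[0])
--
--     def scan(want):
--         last, count = -10**9, 0
--         for x, is_low in merged:
--             if is_low == want and x > last:
--                 count += 1
--                 last = x
--                 want = not want
--         return count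
--
--     return max(scan(True), scan(False))
-- ===== Notes on version B (the rewrite author's own statement) =====
-- stated objective: alternative
-- what changed: Replaces A's two independently sorted lists walked by two persistent index pointers with one merged x-sorted list of type-tagged points consumed by a single forward scan per starting type, keeping only a wanted-type flag and the last taken x.
import Mathlib
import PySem

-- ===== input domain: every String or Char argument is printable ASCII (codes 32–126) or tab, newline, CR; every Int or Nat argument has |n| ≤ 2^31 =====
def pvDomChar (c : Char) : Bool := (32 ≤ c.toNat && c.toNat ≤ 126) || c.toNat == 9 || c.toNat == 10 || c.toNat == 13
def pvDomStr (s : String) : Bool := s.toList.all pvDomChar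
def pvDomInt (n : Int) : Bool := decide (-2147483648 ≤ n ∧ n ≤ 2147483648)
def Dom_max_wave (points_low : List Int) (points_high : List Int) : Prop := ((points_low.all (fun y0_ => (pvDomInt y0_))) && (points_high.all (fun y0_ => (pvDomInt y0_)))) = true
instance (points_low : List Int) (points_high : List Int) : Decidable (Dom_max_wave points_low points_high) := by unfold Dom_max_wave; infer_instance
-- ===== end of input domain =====

-- B replaces A's two separately sorted lists with two index pointers by one merged
-- x-sorted type-tagged list scanned once per starting type; objective: alternative.

-- ===== PORT A =====
-- inner 'while i < len(xs) and xs[i] <= last: i += 1' of A's simulate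
def pvAdvanceA (xs : List Int) (last : Int) (i : Nat) : Nat :=
  if h : i < xs.length then
    if xs[i] ≤ last then pvAdvanceA xs last (i + 1) else i
  else i
termination_by xs.length - i

-- A's 'while True' loop; fuel bounds the number of outer iterations (each one consumes a point)
def pvSimA (low high : List Int) (fuel : Nat) (want : Bool) (i j : Nat) (last count : Int) : Int :=
  match fuel with
  | 0 => count
  | fuel + 1 =>
    if want then
      let i' := pvAdvanceA low last i
      if h : i' < low.length then
        pvSimA low high fuel false (i' + 1) j low[i'] (count + 1)
      else count
    else
      let j' := pvAdvanceA high last j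
      if h : j' < high.length then
        pvSimA low high fuel true i (j' + 1) high[j'] (count + 1)
      else count

def max_wave (points_low : List Int) (points_high : List Int) : Int :=
  let low := PySem.List.sorted points_low (fun x => x) false
  let high := PySem.List.sorted points_high (fun x => x) false
  max (pvSimA low high (low.length + high.length + 1) true 0 0 (-10 ^ 9) 0)
      (pvSimA low high (low.length + high.length + 1) false 0 0 (-10 ^ 9) 0)

-- ===== PORT B =====
-- Source B's 'for x, is_low in merged: …' scan with the want flag
def pvScan : List (Int × Bool) → Bool → Int → Int → Int
  | [], _, _, count => count
  | (x, t) :: rest, want, last, count =>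
    if t == want && decide (x > last) then pvScan rest (!want) x (count + 1)
    else pvScan rest want last count

def max_wave_alt (points_low : List Int) (points_high : List Int) : Int :=
  let merged := PySem.List.sorted
    (points_low.map (fun x => (x, true)) ++ points_high.map (fun x => (x, false)))
    (fun p => p.1) false
  max (pvScan merged true (-10 ^ 9) 0) (pvScan merged false (-10 ^ 9) 0)

-- ===== PRECONDITION & SPEC =====
def Spec_max_wave (points_low : List Int) (points_high : List Int) (out : Int) : Prop := out = max_wave_alt points_low points_high
instance (points_low : List Int) (points_high : List Int) (out : Int) : Decidable (Spec_max_wave points_low points_high out) := by unfold Spec_max_wave; infer_instance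

-- ===== CLAIM (what is proved, stated in full; the proofs are below) =====
def Claim_equal_max_wave : Prop := ∀ (points_low : List Int) (points_high : List Int), Dom_max_wave points_low points_high → Spec_max_wave points_low points_high (max_wave points_low points_high)

-- ===== LEMMAS AND PROOFS =====

-- proof intermediate: the alternating greedy consumption of two sorted streams
def pvNextGt (a : List Int) (last : Int) : Option (Int × List Int) :=
  match a with
  | [] => none
  | v :: vs => if v > last then some (v, vs) else pvNextGt vs last

theorem pvNextGt_len {a : List Int} {last x : Int} {a' : List Int}
    (h : pvNextGt a last = some (x, a')) : a'.length < a.length := by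
  induction a with
  | nil => simp [pvNextGt] at h
  | cons v vs ih =>
    by_cases hv : v > last
    · simp [pvNextGt, hv] at h
      simp [← h.2]
    · simp [pvNextGt, hv] at h
      exact Nat.lt_succ_of_lt (ih h)

theorem pvNextGt_mem {a : List Int} {last x : Int} {a' : List Int}
    (h : pvNextGt a last = some (x, a')) : x ∈ a := by
  induction a with
  | nil => simp [pvNextGt] at h
  | cons v vs ih =>
    by_cases hv : v > last
    · simp [pvNextGt, hv] at h
      simp [h.1]
    · simp [pvNextGt, hv] at h
      exact List.mem_cons_of_mem _ (ih h)

def pvChain (a b : List Int) (last count : Int) : Int :=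
  match h : pvNextGt a last with
  | none => count
  | some (x, a') => pvChain b a' x (count + 1)
termination_by a.length + b.length
decreasing_by
  have := pvNextGt_len h
  omega

theorem pvChain_none {a b : List Int} {last count : Int}
    (h : pvNextGt a last = none) : pvChain a b last count = count := by
  rw [pvChain]; split <;> simp_all

theorem pvChain_some {a b : List Int} {last count x : Int} {a' : List Int}
    (h : pvNextGt a last = some (x, a')) :
    pvChain a b last count = pvChain b a' x (count + 1) := by
  rw [pvChain]; split <;> simp_all

theorem pvAdvanceA_le (xs : List Int) (last : Int) (i : Nat) :
    i ≤ pvAdvanceA xs last i := by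
  induction i using pvAdvanceA.induct xs last with
  | case1 i h hle ih => rw [pvAdvanceA]; simp [h, hle]; omega
  | case2 i h hgt => rw [pvAdvanceA]; simp [h, hgt]
  | case3 i h => rw [pvAdvanceA]; simp [h]

-- the pointer skip loop of A, seen on the suffix, is exactly pvNextGt
theorem pvNextGt_drop (xs : List Int) (last : Int) (i : Nat) :
    pvNextGt (xs.drop i) last =
      if h : pvAdvanceA xs last i < xs.length then
        some (xs[pvAdvanceA xs last i], xs.drop (pvAdvanceA xs last i + 1))
      else none := by
  induction i using pvAdvanceA.induct xs last with
  | case1 i h hle ih =>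
    rw [pvAdvanceA]
    simp only [h, hle, dite_true, if_true]
    rw [List.drop_eq_getElem_cons h]
    simp [pvNextGt, not_lt.mpr hle, ih]
  | case2 i h hgt =>
    rw [pvAdvanceA]
    simp only [h, hgt, dite_true]
    rw [List.drop_eq_getElem_cons h]
    simp [pvNextGt, hgt, h]
  | case3 i h =>
    rw [pvAdvanceA]
    have : xs.length ≤ i := le_of_not_gt h
    simp [List.drop_eq_nil_of_le this, pvNextGt, h]

theorem pvSimA_eq_chain (low high : List Int) :
    ∀ fuel i j last count, low.length - i + (high.length - j) < fuel →
      pvSimA low high fuel true i j last count = pvChain (low.drop i) (high.drop j) last count ∧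
      pvSimA low high fuel false i j last count = pvChain (high.drop j) (low.drop i) last count := by
  intro fuel
  induction fuel with
  | zero => intro i j last count h; omega
  | succ fuel ih =>
    intro i j last count h
    constructor
    · rw [pvSimA]
      have hd := pvNextGt_drop low last i
      by_cases hi : pvAdvanceA low last i < low.length
      · have hb := pvAdvanceA_le low last i
        rw [dif_pos hi] at hd
        rw [pvChain_some hd]
        simp only [hi, dite_true, if_true]
        exact (ih (pvAdvanceA low last i + 1) j low[pvAdvanceA low last i] (count + 1)
          (by omega)).2
      · rw [dif_neg hi] at hd
        rw [pvChain_none hd]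
        simp [hi]
    · rw [pvSimA]
      have hd := pvNextGt_drop high last j
      by_cases hj : pvAdvanceA high last j < high.length
      · have hb := pvAdvanceA_le high last j
        rw [dif_pos hj] at hd
        rw [pvChain_some hd]
        simp only [hj, dite_true, if_false, Bool.false_eq_true]
        exact (ih i (pvAdvanceA high last j + 1) high[pvAdvanceA high last j] (count + 1)
          (by omega)).1
      · rw [dif_neg hj] at hd
        rw [pvChain_none hd]
        simp [hj]

-- a head already ≤ last is skipped by the greedy chain
theorem pvChain_cons_le {x last : Int} (h : x ≤ last) (a b : List Int) (count : Int) :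
    pvChain (x :: a) b last count = pvChain a b last count := by
  have hx : pvNextGt (x :: a) last = pvNextGt a last := by
    simp [pvNextGt, not_lt.mpr h]
  cases h2 : pvNextGt a last with
  | none => rw [pvChain_none (hx.trans h2), pvChain_none h2]
  | some p =>
    obtain ⟨x', a'⟩ := p
    rw [pvChain_some (hx.trans h2), pvChain_some h2]

-- a head of the waiting stream below every element of the active stream never fires
theorem pvChain_cons_snd {x : Int} {a : List Int} (hall : ∀ y ∈ a, x ≤ y)
    (b : List Int) (last count : Int) :
    pvChain a (x :: b) last count = pvChain a b last count := by
  cases h2 : pvNextGt a last with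
  | none => rw [pvChain_none h2, pvChain_none h2]
  | some p =>
    obtain ⟨x', a'⟩ := p
    rw [pvChain_some h2, pvChain_some h2]
    exact pvChain_cons_le (hall x' (pvNextGt_mem h2)) b a' (count + 1)

-- project the tagged points of one type out of the merged list
def pvProj (t : Bool) (m : List (Int × Bool)) : List Int :=
  (m.filter (fun p => p.2 == t)).map Prod.fst

-- B's single scan over a sorted merged list is A's alternating two-stream greedy
theorem pvScan_eq_chain (m : List (Int × Bool))
    (hs : m.Pairwise (fun p q => p.1 ≤ q.1)) :
    ∀ want last count,
      pvScan m want last count = pvChain (pvProj want m) (pvProj (!want) m) last count := by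
  induction m with
  | nil =>
    intro want last count
    simp only [pvProj, List.filter_nil, List.map_nil]
    rw [pvChain_none rfl]
    rfl
  | cons p rest ih =>
    obtain ⟨x, t⟩ := p
    have ht : ∀ q ∈ rest, x ≤ q.1 := fun q hq => (List.pairwise_cons.mp hs).1 q hq
    have hrest := (List.pairwise_cons.mp hs).2
    intro want last count
    by_cases hw : t = want
    · subst hw
      have hkeep : pvProj t ((x, t) :: rest) = x :: pvProj t rest := by
        simp [pvProj]
      have hdrop : pvProj (!t) ((x, t) :: rest) = pvProj (!t) rest := by
        simp [pvProj]
      by_cases hx : x > last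
      · have : pvNextGt (x :: pvProj t rest) last = some (x, pvProj t rest) := by
          simp [pvNextGt, hx]
        rw [hkeep, hdrop, pvChain_some this]
        simp only [pvScan, beq_self_eq_true, hx, decide_true, Bool.and_self, if_true]
        simpa using ih hrest (!t) x (count + 1)
      · rw [hkeep, hdrop, pvChain_cons_le (not_lt.mp hx)]
        simp only [pvScan, beq_self_eq_true, hx, decide_false, Bool.and_false,
          Bool.false_eq_true, if_false]
        exact ih hrest t last count
    · have hkeep : pvProj (!want) ((x, t) :: rest) = x :: pvProj (!want) rest := by
        have : t = !want := by cases t <;> cases want <;> simp_all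
        simp [pvProj, this]
      have hdrop : pvProj want ((x, t) :: rest) = pvProj want rest := by
        simp [pvProj, hw]
      have hall : ∀ y ∈ pvProj want rest, x ≤ y := by
        intro y hy
        simp only [pvProj, List.mem_map, List.mem_filter] at hy
        obtain ⟨q, ⟨hq, _⟩, hfst⟩ := hy
        exact hfst ▸ ht q hq
      rw [hkeep, hdrop, pvChain_cons_snd hall]
      simp only [pvScan]
      simpa [hw] using ih hrest want last count

-- the wanted-type subsequence of the merged sort IS the separate sort of that input list
theorem pvProj_merged_true (pl ph : List Int) :
    pvProj true (PySem.List.sorted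
      (pl.map (fun x => (x, true)) ++ ph.map (fun x => (x, false))) (fun p => p.1) false)
    = PySem.List.sorted pl (fun x => x) false := by
  refine (PySem.List.sorted_id_eq_of_perm_of_pairwise _ _ ?_ ?_).symm
  · have hperm := PySem.List.sorted_perm
      (pl.map (fun x => (x, true)) ++ ph.map (fun x => (x, false))) (fun p => p.1) false
    have := (hperm.filter (fun p => p.2 == true)).map Prod.fst
    simpa [pvProj, List.filter_append, List.filter_map, List.map_map,
      Function.comp_def] using this
  · have hp := PySem.List.sorted_pairwise
      (pl.map (fun x => (x, true)) ++ ph.map (fun x => (x, false))) (fun p => p.1)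
    exact ((hp.sublist List.filter_sublist).map Prod.fst (fun a b h => h))

theorem pvProj_merged_false (pl ph : List Int) :
    pvProj false (PySem.List.sorted
      (pl.map (fun x => (x, true)) ++ ph.map (fun x => (x, false))) (fun p => p.1) false)
    = PySem.List.sorted ph (fun x => x) false := by
  refine (PySem.List.sorted_id_eq_of_perm_of_pairwise _ _ ?_ ?_).symm
  · have hperm := PySem.List.sorted_perm
      (pl.map (fun x => (x, true)) ++ ph.map (fun x => (x, false))) (fun p => p.1) false
    have := (hperm.filter (fun p => p.2 == false)).map Prod.fst
    simpa [pvProj, List.filter_append, List.filter_map, List.map_map,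
      Function.comp_def] using this
  · have hp := PySem.List.sorted_pairwise
      (pl.map (fun x => (x, true)) ++ ph.map (fun x => (x, false))) (fun p => p.1)
    exact ((hp.sublist List.filter_sublist).map Prod.fst (fun a b h => h))

-- ===== VERDICT (by name: the statement is the Claim_ definition above) =====
theorem max_wave_spec : Claim_equal_max_wave := by
  intro points_low points_high _
  unfold Spec_max_wave max_wave max_wave_alt
  dsimp only
  have hms : (PySem.List.sorted
      (points_low.map (fun x => (x, true)) ++ points_high.map (fun x => (x, false)))
      (fun p => p.1) false).Pairwise (fun p q => p.1 ≤ q.1) :=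
    PySem.List.sorted_pairwise _ _
  have hA := pvSimA_eq_chain (PySem.List.sorted points_low (fun x => x) false)
    (PySem.List.sorted points_high (fun x => x) false)
    ((PySem.List.sorted points_low (fun x => x) false).length +
      (PySem.List.sorted points_high (fun x => x) false).length + 1) 0 0 (-10 ^ 9) 0 (by omega)
  have hT := pvScan_eq_chain _ hms true (-10 ^ 9) 0
  have hF := pvScan_eq_chain _ hms false (-10 ^ 9) 0
  simp only [Bool.not_true, Bool.not_false] at hT hF
  rw [pvProj_merged_true, pvProj_merged_false] at hT
  rw [pvProj_merged_true, pvProj_merged_false] at hF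
  simp only [List.drop_zero] at hA
  rw [hA.1, hA.2, hT, hF]
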